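-- pv_equiv track=rewrite | github.com/MrBrantCode/unitest_baseline | mut_generate/mist_train_cf/cf_43822/solution.py | sort_nums
-- ===== SOURCE A (Python) =====
-- def sort_nums(lst, order):
--   # split the list into multiples of 3 and others
--   multiples_of_3 = [num for num in lst if num % 3 == 0]
--   others = [num for num in lst if num % 3 != 0]
--
--   # sort the 'others' list in ascending or descending order
--   if order == 'asc':
--       others = sorted(others)
--   else: # 'desc'
--       others = sorted(others, reverse=True)
--
--   # append the 'multiples_of_3' list to the 'others' list
--   result = others + multiples_of_3
--   return result
-- ===== SOURCE B (Python) =====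
-- def sort_nums(lst, order):
--     def key(num):
--         if num % 3 == 0:
--             return (1, 0)
--         return (0, num) if order == 'asc' else (0, -num)
--     return sorted(lst, key=key)
-- ===== Notes on version B (the rewrite author's own statement) =====
-- stated objective: idiomatic
-- what changed: Replaced the two filtering comprehensions, separate sort and list concatenation by a single stable sorted() call with a composite key that sends multiples of 3 to a constant largest key (keeping their original order by stability) and encodes descending order by negating the key rather than reverse=True.
import Mathlib
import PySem

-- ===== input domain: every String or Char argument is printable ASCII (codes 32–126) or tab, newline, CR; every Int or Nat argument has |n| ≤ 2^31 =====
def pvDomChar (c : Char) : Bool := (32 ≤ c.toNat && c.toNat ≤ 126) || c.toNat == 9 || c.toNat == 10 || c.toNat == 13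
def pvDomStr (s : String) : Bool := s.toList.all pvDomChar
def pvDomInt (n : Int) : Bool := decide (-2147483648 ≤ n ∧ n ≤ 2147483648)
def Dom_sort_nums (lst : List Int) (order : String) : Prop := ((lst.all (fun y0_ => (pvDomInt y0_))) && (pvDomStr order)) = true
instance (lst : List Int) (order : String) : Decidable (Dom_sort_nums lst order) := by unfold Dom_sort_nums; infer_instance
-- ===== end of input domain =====

-- B replaces A's split / sort / concatenate by one stable sort with a composite key (idiomatic single sorted() call).

-- ===== PORT A =====
def sort_nums (lst : List Int) (order : String) : List Int :=
  let multiples_of_3 := lst.filter (fun num => decide (PySem.Int.mod num 3 = 0))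
  let others := lst.filter (fun num => decide (PySem.Int.mod num 3 ≠ 0))
  let others' := if order == "asc" then PySem.List.sorted others (fun x => x) false
                 else PySem.List.sorted others (fun x => x) true
  others' ++ multiples_of_3

-- ===== PORT B =====
-- B's tuple-valued key (1,0) / (0,±num) is ported as sorted2 with the two components.
def sort_nums_alt (lst : List Int) (order : String) : List Int :=
  PySem.List.sorted2 lst
    (fun num => if PySem.Int.mod num 3 = 0 then (1 : Int) else 0)
    (fun num => if PySem.Int.mod num 3 = 0 then (0 : Int) else if order == "asc" then num else -num)
    false

-- ===== PRECONDITION & SPEC =====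
def Spec_sort_nums (lst : List Int) (order : String) (out : List Int) : Prop := out = sort_nums_alt lst order
instance (lst : List Int) (order : String) (out : List Int) : Decidable (Spec_sort_nums lst order out) := by unfold Spec_sort_nums; infer_instance

-- ===== CLAIM (what is proved, stated in full; the proofs are below) =====
def Claim_equal_sort_nums : Prop := ∀ (lst : List Int) (order : String), Dom_sort_nums lst order → Spec_sort_nums lst order (sort_nums lst order)

-- ===== LEMMAS AND PROOFS =====

-- proof-only abbreviations for B's two key components and the resulting insertion predicate
def k1f (n : Int) : Int := if PySem.Int.mod n 3 = 0 then 1 else 0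
def k2f (asc : Bool) (n : Int) : Int := if PySem.Int.mod n 3 = 0 then 0 else if asc then n else -n
def lt2 (asc : Bool) (a b : Int) : Bool :=
  decide (k1f a < k1f b) || !decide (k1f b < k1f a) && decide (k2f asc a < k2f asc b)

theorem insertBy_congr_mem {α : Type} (b1 b2 : α → α → Bool) (x : α) (ys : List α)
    (h : ∀ y ∈ ys, b1 x y = b2 x y) :
    PySem.List.insertBy b1 x ys = PySem.List.insertBy b2 x ys := by
  induction ys with
  | nil => rfl
  | cons y ys ih =>
    have hy := h y (List.mem_cons_self)
    by_cases hb : b1 x y = true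
    · simp [PySem.List.insertBy, hb, hy ▸ hb]
    · simp only [Bool.not_eq_true] at hb
      simp [PySem.List.insertBy, hb, hy ▸ hb,
        ih (fun z hz => h z (List.mem_cons_of_mem _ hz))]

theorem insertBy_append_before {α : Type} (before : α → α → Bool) (x : α) (as bs : List α)
    (h : ∀ y ∈ bs, before x y = true) :
    PySem.List.insertBy before x (as ++ bs) = PySem.List.insertBy before x as ++ bs := by
  induction as with
  | nil =>
    cases bs with
    | nil => rfl
    | cons b bs => simp [PySem.List.insertBy, h b List.mem_cons_self]
  | cons a as ih =>
    by_cases hb : before x a = true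
    · simp [PySem.List.insertBy, hb]
    · simp only [Bool.not_eq_true] at hb
      simp [PySem.List.insertBy, hb, ih]

theorem lt2_mult_false (asc : Bool) (x y : Int) (hx : PySem.Int.mod x 3 = 0) :
    lt2 asc x y = false := by
  rw [PySem.Int.mod_eq_zero_iff_dvd] at hx
  by_cases hy : (3 : Int) ∣ y <;>
    simp [lt2, k1f, k2f, hx, hy]

theorem lt2_other_mult_true (asc : Bool) (x y : Int) (hx : ¬ PySem.Int.mod x 3 = 0)
    (hy : PySem.Int.mod y 3 = 0) : lt2 asc x y = true := by
  rw [PySem.Int.mod_eq_zero_iff_dvd] at hy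
  have hx' : ¬ (3 : Int) ∣ x := by rwa [PySem.Int.mod_eq_zero_iff_dvd] at hx
  simp [lt2, k1f, hx', hy]

theorem lt2_other_other (asc : Bool) (x y : Int) (hx : ¬ PySem.Int.mod x 3 = 0)
    (hy : ¬ PySem.Int.mod y 3 = 0) :
    lt2 asc x y = (if asc then decide (x < y) else decide (y < x)) := by
  have hx' : ¬ (3 : Int) ∣ x := by rwa [PySem.Int.mod_eq_zero_iff_dvd] at hx
  have hy' : ¬ (3 : Int) ∣ y := by rwa [PySem.Int.mod_eq_zero_iff_dvd] at hy
  cases asc <;>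
    simp [lt2, k1f, k2f, hx', hy', neg_lt_neg_iff]

theorem sorted2_snoc (asc : Bool) (ys : List Int) (x : Int) :
    PySem.List.sorted2 (ys ++ [x]) k1f (k2f asc) false =
      PySem.List.insertBy (lt2 asc) x (PySem.List.sorted2 ys k1f (k2f asc) false) := by
  simp only [PySem.List.sorted2, List.foldl_append]
  rfl

theorem sorted_snoc (rev : Bool) (ys : List Int) (x : Int) :
    PySem.List.sorted (ys ++ [x]) (fun z : Int => z) rev =
      PySem.List.insertBy (fun a b => if rev then decide (b < a) else decide (a < b)) x
        (PySem.List.sorted ys (fun z : Int => z) rev) := by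
  cases rev <;> simp [PySem.List.sorted, List.foldl_append]

-- main invariant: B's single stable sort IS A's sorted-others ++ multiples-in-order
theorem sort_nums_main (asc : Bool) (lst : List Int) :
    PySem.List.sorted2 lst k1f (k2f asc) false =
      PySem.List.sorted (lst.filter (fun n => decide (PySem.Int.mod n 3 ≠ 0))) (fun x => x) (!asc)
        ++ lst.filter (fun n => decide (PySem.Int.mod n 3 = 0)) := by
  induction lst using List.reverseRecOn with
  | nil => cases asc <;> rfl
  | append_singleton ys x ih =>
    rw [sorted2_snoc, ih, List.filter_append, List.filter_append]
    by_cases hx : PySem.Int.mod x 3 = 0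
    · have hxd : (3 : Int) ∣ x := by rwa [PySem.Int.mod_eq_zero_iff_dvd] at hx
      rw [PySem.List.insertBy_of_forall_not_before _ _ _
        (fun y _ => lt2_mult_false asc x y hx)]
      simp [hxd]
    · have hxd : ¬ (3 : Int) ∣ x := by rwa [PySem.Int.mod_eq_zero_iff_dvd] at hx
      have hmem : ∀ y ∈ ys.filter (fun n => decide (PySem.Int.mod n 3 = 0)),
          lt2 asc x y = true := by
        intro y hy
        exact lt2_other_mult_true asc x y hx (by simpa using (List.mem_filter.mp hy).2)
      rw [insertBy_append_before _ _ _ _ hmem]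
      have hcongr : PySem.List.insertBy (lt2 asc) x
            (PySem.List.sorted (ys.filter (fun n => decide (PySem.Int.mod n 3 ≠ 0))) (fun z => z) (!asc)) =
          PySem.List.insertBy (fun a b => if (!asc) then decide (b < a) else decide (a < b)) x
            (PySem.List.sorted (ys.filter (fun n => decide (PySem.Int.mod n 3 ≠ 0))) (fun z => z) (!asc)) := by
        apply insertBy_congr_mem
        intro y hy
        have hy' : ¬ PySem.Int.mod y 3 = 0 := by
          have := (List.mem_filter.mp ((PySem.List.mem_sorted _ _ _ y).mp hy)).2
          simpa using this
        rw [lt2_other_other asc x y hx hy']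
        cases asc <;> rfl
      rw [hcongr, ← sorted_snoc]
      simp [hxd]

-- ===== VERDICT (by name: the statement is the Claim_ definition above) =====
theorem sort_nums_spec : Claim_equal_sort_nums := by
  intro lst order _
  unfold Spec_sort_nums sort_nums sort_nums_alt
  cases horder : (order == "asc")
  · exact (sort_nums_main false lst).symm
  · exact (sort_nums_main true lst).symm
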